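-- pv_equiv track=rewrite | github.com/sachinsahoo98/Test_Repository_Code | Strings/gfg_q10_strings.py | countMatchingPairs
-- ===== SOURCE A (Python) =====
-- def countMatchingPairs(str1, str2):
--
--     outDict = {}
--     countOccurance = 0
--     for char in str1:
--         for character in str2:
--             if character not in outDict and character == char:
--                 countOccurance+=1
--                 outDict[character] = 1
--     return countOccurance
-- ===== SOURCE B (Python) =====
-- def countMatchingPairs(str1, str2):
--     a = sorted(str1)
--     b = sorted(str2)
--     i = j = 0
--     count = 0
--     while i < len(a) and j < len(b):
--         if a[i] == b[j]:
--             c = a[i]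
--             count += 1
--             while i < len(a) and a[i] == c:
--                 i += 1
--             while j < len(b) and b[j] == c:
--                 j += 1
--         elif a[i] < b[j]:
--             i += 1
--         else:
--             j += 1
--     return count
-- ===== Notes on version B (the rewrite author's own statement) =====
-- stated objective: faster
-- what changed: Replaces A's nested scan with a dict over str1 by sorting both strings and counting common runs in a single two-pointer merge pass.
import Mathlib
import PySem

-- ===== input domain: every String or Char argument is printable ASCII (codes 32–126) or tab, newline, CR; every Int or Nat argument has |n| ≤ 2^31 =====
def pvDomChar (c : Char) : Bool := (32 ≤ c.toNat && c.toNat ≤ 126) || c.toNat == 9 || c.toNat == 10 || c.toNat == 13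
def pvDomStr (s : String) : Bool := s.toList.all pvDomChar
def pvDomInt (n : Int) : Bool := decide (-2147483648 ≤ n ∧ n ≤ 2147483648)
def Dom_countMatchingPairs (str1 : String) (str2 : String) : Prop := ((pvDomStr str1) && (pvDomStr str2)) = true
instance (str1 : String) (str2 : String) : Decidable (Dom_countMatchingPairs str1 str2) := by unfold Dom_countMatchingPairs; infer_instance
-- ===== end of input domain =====

-- B sorts both strings and counts the common distinct characters in one two-pointer
-- merge pass instead of A's nested scan with a dict (objective: faster).

-- ===== PORT A =====
-- literal port of A's nested loops: state = (outDict, countOccurance)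
def countMatchingPairs (str1 : String) (str2 : String) : Int :=
  (str1.toList.foldl
    (fun (st : PySem.Dict Char Int × Int) char =>
      str2.toList.foldl
        (fun (st : PySem.Dict Char Int × Int) character =>
          if st.1.contains character = false ∧ character = char then
            (st.1.insert character 1, st.2 + 1)
          else st)
        st)
    (PySem.Dict.empty, 0)).2

-- ===== PORT B =====
-- the two-pointer merge walk of Source B: equal heads count once and both runs
-- of that character are skipped (the inner while-loops become dropWhile)
def pvMergeCount : List Char → List Char → Int
  | [], _ => 0
  | _ :: _, [] => 0
  | x :: a, y :: b =>
    if x = y then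
      1 + pvMergeCount ((x :: a).dropWhile (fun ch => ch == x))
                       ((y :: b).dropWhile (fun ch => ch == x))
    else if x < y then pvMergeCount a (y :: b)
    else pvMergeCount (x :: a) b
termination_by a b => a.length + b.length
decreasing_by
  · simp only [List.dropWhile_cons, BEq.rfl, if_pos]
    have h1 := List.length_dropWhile_le (fun ch => ch == x) a
    have h2 := List.length_dropWhile_le (fun ch => ch == x) b
    simp_all
    omega
  · simp
  · simp

def countMatchingPairs_alt (str1 : String) (str2 : String) : Int :=
  pvMergeCount (PySem.List.sorted str1.toList (fun c => c) false)
               (PySem.List.sorted str2.toList (fun c => c) false)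

-- ===== PRECONDITION & SPEC =====
def Spec_countMatchingPairs (str1 : String) (str2 : String) (out : Int) : Prop := out = countMatchingPairs_alt str1 str2
instance (str1 : String) (str2 : String) (out : Int) : Decidable (Spec_countMatchingPairs str1 str2 out) := by unfold Spec_countMatchingPairs; infer_instance

-- ===== CLAIM (what is proved, stated in full; the proofs are below) =====
def Claim_equal_countMatchingPairs : Prop := ∀ (str1 : String) (str2 : String), Dom_countMatchingPairs str1 str2 → Spec_countMatchingPairs str1 str2 (countMatchingPairs str1 str2)

-- ===== LEMMAS AND PROOFS =====

-- A's inner loop over str2 for a fixed char c: add c (and bump the count) iff c occurs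
-- in str2 and is not yet a key of the dict
theorem countMatchingPairs_inner (s2 : List Char) (c : Char) (st : PySem.Dict Char Int × Int) :
    s2.foldl
      (fun (st : PySem.Dict Char Int × Int) character =>
        if st.1.contains character = false ∧ character = c then
          (st.1.insert character 1, st.2 + 1)
        else st) st
    = if c ∈ s2 ∧ st.1.contains c = false then (st.1.insert c 1, st.2 + 1) else st := by
  induction s2 generalizing st with
  | nil => simp
  | cons ch t ih =>
    simp only [List.foldl_cons, List.mem_cons]
    by_cases h1 : ch = c
    · subst h1
      by_cases h2 : st.1.contains ch = false
      · rw [if_pos ⟨h2, rfl⟩, ih]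
        simp [PySem.Dict.contains_insert_self, h2]
      · rw [if_neg (by tauto), ih]
        simp [h2]
    · rw [if_neg (by tauto), ih]
      by_cases hm : c ∈ t <;> simp [hm, Ne.symm h1]

-- A's outer loop: the count is the cardinality of (keys so far) ∪ (chars common to the rest and str2)
theorem countMatchingPairs_outer (s1 s2 : List Char) (d : PySem.Dict Char Int) (n : Int)
    (hd : d.keys.Nodup) (hn : n = (d.keys.toFinset.card : Int)) :
    (s1.foldl
      (fun (st : PySem.Dict Char Int × Int) char =>
        s2.foldl
          (fun (st : PySem.Dict Char Int × Int) character =>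
            if st.1.contains character = false ∧ character = char then
              (st.1.insert character 1, st.2 + 1)
            else st) st)
      (d, n)).2
    = (((d.keys.toFinset ∪ (s1.toFinset ∩ s2.toFinset)).card : Nat) : Int) := by
  induction s1 generalizing d n with
  | nil => simpa using hn
  | cons c t ih =>
    rw [List.foldl_cons, countMatchingPairs_inner]
    by_cases h : c ∈ s2 ∧ d.contains c = false
    · rw [if_pos h]
      have hnk : c ∉ d.keys := by
        intro hc
        have := (PySem.Dict.contains_iff_mem_keys d c).mpr hc
        simp [h.2] at this
      have hkeys : (d.insert c (1 : Int)).keys = d.keys ++ [c] :=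
        PySem.Dict.keys_insert_of_not_contains _ _ h.2
      have hnd' : (d.insert c (1 : Int)).keys.Nodup := by
        rw [hkeys]
        simp [List.nodup_append, hd]
        exact fun a ha hac => hnk (hac ▸ ha)
      have hcard : ((d.insert c (1 : Int)).keys.toFinset.card : Int) = n + 1 := by
        rw [hkeys, hn]
        have : (d.keys ++ [c]).toFinset = insert c d.keys.toFinset := by
          ext z; simp
        rw [this, Finset.card_insert_of_notMem (by simpa using hnk)]
        push_cast; ring
      rw [ih _ _ hnd' hcard.symm]
      congr 2
      rw [hkeys]
      ext z
      by_cases hz : z = c <;> simp [hz, h.1, or_comm]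
    · rw [if_neg h, ih _ _ hd hn]
      congr 2
      rw [not_and_or] at h
      ext z
      by_cases hz : z = c
      · subst hz
        by_cases hzs : z ∈ s2
        · have : z ∈ d.keys := by
            rcases h with h | h
            · exact absurd hzs h
            · exact (PySem.Dict.contains_iff_mem_keys _ _).mp (by simpa using h)
          simp [hzs, this]
        · simp [hzs]
      · simp [hz]

theorem countMatchingPairs_A_card (s1 s2 : String) :
    countMatchingPairs s1 s2 = (((s1.toList.toFinset ∩ s2.toList.toFinset).card : Nat) : Int) := by
  unfold countMatchingPairs
  rw [countMatchingPairs_outer _ _ _ _ (by simp [PySem.Dict.keys_empty]) (by simp [PySem.Dict.keys_empty])]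
  simp [PySem.Dict.keys_empty]

-- on a sorted list whose elements are all ≥ x, dropping the leading run of x removes exactly x
theorem dropWhile_toFinset_sorted (x : Char) (l : List Char)
    (hs : l.Pairwise (· ≤ ·)) (hge : ∀ z ∈ l, x ≤ z) :
    (l.dropWhile (fun ch => ch == x)).toFinset = l.toFinset.erase x := by
  induction l with
  | nil => simp
  | cons h t ih =>
    rcases List.pairwise_cons.mp hs with ⟨hht, hts⟩
    by_cases hx : h = x
    · subst hx
      rw [List.dropWhile_cons_of_pos (by simp)]
      rw [ih hts (fun z hz => hge z (List.mem_cons_of_mem _ hz))]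
      simp [Finset.erase_insert_eq_erase]
    · rw [List.dropWhile_cons_of_neg (by simpa using hx)]
      have hxl : x ∉ h :: t := by
        intro hm
        rcases List.mem_cons.mp hm with h1 | h1
        · exact hx h1.symm
        · exact hx (le_antisymm (hge h (by simp)) (hht x h1)).symm
      rw [Finset.erase_eq_of_notMem (by simpa using hxl)]

-- the merge walk over two sorted lists counts the distinct common characters
theorem pvMergeCount_card (a b : List Char)
    (ha : a.Pairwise (· ≤ ·)) (hb : b.Pairwise (· ≤ ·)) :
    pvMergeCount a b = (((a.toFinset ∩ b.toFinset).card : Nat) : Int) := by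
  revert ha hb
  fun_induction pvMergeCount a b with
  | case1 b => simp
  | case2 x a => simp
  | case3 a x b ih =>
    intro ha hb
    have hgea : ∀ z ∈ x :: a, x ≤ z := by
      intro z hz
      rcases List.mem_cons.mp hz with h | h
      · exact h ▸ le_refl x
      · exact (List.pairwise_cons.mp ha).1 z h
    have hgeb : ∀ z ∈ x :: b, x ≤ z := by
      intro z hz
      rcases List.mem_cons.mp hz with h | h
      · exact h ▸ le_refl x
      · exact (List.pairwise_cons.mp hb).1 z h
    have hfa := dropWhile_toFinset_sorted x (x :: a) ha hgea
    have hfb := dropWhile_toFinset_sorted x (x :: b) hb hgeb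
    rw [ih (ha.sublist (List.dropWhile_sublist _)) (hb.sublist (List.dropWhile_sublist _)),
        hfa, hfb]
    have hmem : x ∈ (x :: a).toFinset ∩ (x :: b).toFinset := by simp
    have hinter : ((x :: a).toFinset.erase x) ∩ ((x :: b).toFinset.erase x)
        = ((x :: a).toFinset ∩ (x :: b).toFinset).erase x := by
      ext z; simp; tauto
    rw [hinter, Finset.card_erase_of_mem hmem]
    have hpos : 0 < ((x :: a).toFinset ∩ (x :: b).toFinset).card := Finset.card_pos.mpr ⟨x, hmem⟩
    omega
  | case4 x a y b hne hlt ih =>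
    intro ha hb
    have hx : x ∉ insert y b.toFinset := by
      simp only [Finset.mem_insert, List.mem_toFinset]
      rintro (h | h)
      · exact hne h
      · exact absurd ((List.pairwise_cons.mp hb).1 x h) (not_le.mpr hlt)
    rw [ih ha.of_cons hb]
    have : (x :: a).toFinset ∩ (y :: b).toFinset = a.toFinset ∩ (y :: b).toFinset := by
      simp only [List.toFinset_cons]
      exact Finset.insert_inter_of_notMem hx
    rw [this]
  | case5 x a y b hne hnlt ih =>
    intro ha hb
    have hylt : y < x := lt_of_le_of_ne (not_lt.mp hnlt) (fun h => hne h.symm)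
    have hy : y ∉ insert x a.toFinset := by
      simp only [Finset.mem_insert, List.mem_toFinset]
      rintro (h | h)
      · exact hne h.symm
      · exact absurd ((List.pairwise_cons.mp ha).1 y h) (not_le.mpr hylt)
    rw [ih ha hb.of_cons]
    have : (x :: a).toFinset ∩ (y :: b).toFinset = (x :: a).toFinset ∩ b.toFinset := by
      simp only [List.toFinset_cons]
      rw [Finset.inter_comm, Finset.insert_inter_of_notMem hy, Finset.inter_comm]
    rw [this]

theorem countMatchingPairs_B_card (s1 s2 : String) :
    countMatchingPairs_alt s1 s2 = (((s1.toList.toFinset ∩ s2.toList.toFinset).card : Nat) : Int) := by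
  unfold countMatchingPairs_alt
  rw [pvMergeCount_card _ _
        (PySem.List.sorted_pairwise s1.toList (fun c => c))
        (PySem.List.sorted_pairwise s2.toList (fun c => c)),
      List.toFinset_eq_of_perm _ _ (PySem.List.sorted_perm s1.toList (fun c => c) false),
      List.toFinset_eq_of_perm _ _ (PySem.List.sorted_perm s2.toList (fun c => c) false)]

-- ===== VERDICT (by name: the statement is the Claim_ definition above) =====
theorem countMatchingPairs_spec : Claim_equal_countMatchingPairs := by
  intro s1 s2 _
  unfold Spec_countMatchingPairs
  rw [countMatchingPairs_A_card, countMatchingPairs_B_card]
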